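-- pv_equiv track=rewrite | github.com/KwonTaeyong/Python_v7 | learning84.py | solution
-- ===== SOURCE A (Python) =====
-- def solution(n, count):
--     MOD = 1_000_000_007
--     if count > n or count < 1:
--         return 0
--     # dp[i][j] = i개의 높이(1..i)를 배치했을 때, 보이는 서로다른 높이 수가 j인 경우의 수
--     dp = [[0] * (n + 1) for _ in range(n + 1)]
--     dp[1][1] = 1
--     for i in range(2, n + 1):
--         mul = (2 * i - 2) % MOD
--         for j in range(1, i + 1):
--             dp[i][j] = (dp[i-1][j-1] + mul * dp[i-1][j]) % MOD
--     return dp[n][count]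
-- ===== SOURCE B (Python) =====
-- def solution(n, count):
--     MOD = 1_000_000_007
--     if count > n or count < 1:
--         return 0
--
--     def conv(a, b):
--         # coefficient lists -> coefficient list of the product, mod MOD
--         res = []
--         for k in range(len(a) + len(b) - 1):
--             lo = max(0, k - len(b) + 1)
--             hi = min(k, len(a) - 1)
--             s = 0
--             for i in range(lo, hi + 1):
--                 s += a[i] * b[k - i]
--             res.append(s % MOD)
--         return res
--
--     def prod(ks):
--         # coefficient list of prod_{c in ks} (x + c), by divide and conquer
--         if not ks:
--             return [1]
--         if len(ks) == 1:
--             return [ks[0], 1]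
--         m = len(ks) // 2
--         return conv(prod(ks[:m]), prod(ks[m:]))
--
--     ks = [2 * k % MOD for k in range(1, n)]
--     return prod(ks)[count - 1]
-- ===== Notes on version B (the rewrite author's own statement) =====
-- stated objective: alternative
-- what changed: Replaces the (n+1)x(n+1) DP table (row recurrence dp[i][j]=dp[i-1][j-1]+(2i-2)dp[i-1][j] mod p) by divide-and-conquer polynomial multiplication: the answer is the coefficient of x^(count-1) in prod_{k=1}^{n-1}(x+2k) mod p, computed by recursively splitting the factor list and convolving coefficient lists.
import Mathlib
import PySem

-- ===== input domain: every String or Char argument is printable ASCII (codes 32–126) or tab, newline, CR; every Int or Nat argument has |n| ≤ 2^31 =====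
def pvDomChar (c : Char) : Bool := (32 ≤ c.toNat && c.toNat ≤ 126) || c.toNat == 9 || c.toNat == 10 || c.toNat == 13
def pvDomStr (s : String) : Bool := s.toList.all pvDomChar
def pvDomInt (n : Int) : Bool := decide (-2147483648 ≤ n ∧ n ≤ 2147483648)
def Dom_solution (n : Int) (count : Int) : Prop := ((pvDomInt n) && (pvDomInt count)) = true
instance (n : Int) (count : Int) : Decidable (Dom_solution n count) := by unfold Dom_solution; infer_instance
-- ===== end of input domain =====

-- B replaces A's (n+1)×(n+1) DP table by divide-and-conquer multiplication of the
-- factor list of ∏_{k=1}^{n-1}(x+2k) mod p: the answer is its x^(count-1) coefficient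
-- (a different algorithm of similar cost; no speed claim).

-- ===== PORT A =====
def pvMOD : Int := 1000000007

-- body of A's inner 'for j in range(1, i+1)' loop (all indices are provably ≥ 0 and in range)
def solutionInner (mul : Int) (i : Int) (dp : List (List Int)) (j : Int) : List (List Int) :=
  let prev := dp.getD (i - 1).toNat []
  let v := PySem.Int.mod (prev.getD (j - 1).toNat 0 + mul * prev.getD j.toNat 0) pvMOD
  dp.set i.toNat ((dp.getD i.toNat []).set j.toNat v)

-- body of A's outer 'for i in range(2, n+1)' loop
def solutionOuter (dp : List (List Int)) (i : Int) : List (List Int) :=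
  let mul := PySem.Int.mod (2 * i - 2) pvMOD
  (PySem.List.pyRange 1 (i + 1) 1).foldl (solutionInner mul i) dp

def solution (n : Int) (count : Int) : Int :=
  if count > n ∨ count < 1 then 0
  else
    let N := (n + 1).toNat
    let dp0 := List.replicate N (List.replicate N (0 : Int))
    let dp1 := dp0.set 1 ((dp0.getD 1 []).set 1 1)
    let dpF := (PySem.List.pyRange 2 (n + 1) 1).foldl solutionOuter dp1
    (dpF.getD n.toNat []).getD count.toNat 0

-- ===== PORT B =====
-- coefficient lists -> coefficient list of the product, mod pvMOD
def convB (a b : List Int) : List Int :=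
  (List.range (a.length + b.length - 1)).foldl (fun res k =>
    let lo := k + 1 - b.length        -- max(0, k - len(b) + 1)
    let hi := min k (a.length - 1)
    let s := (List.range' lo (hi + 1 - lo)).foldl
      (fun s i => s + a.getD i 0 * b.getD (k - i) 0) 0
    res ++ [PySem.Int.mod s pvMOD]) []

-- coefficient list of ∏_{c ∈ ks} (x + c), by divide and conquer
-- (fuel = ks.length bounds the recursion depth; it only makes the recursion structural,
--  the fuel-0 branch is never reached when fuel ≥ ks.length)
def prodPolyF (fuel : Nat) (ks : List Int) : List Int :=
  match fuel with
  | 0 => [1]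
  | fuel + 1 =>
    if ks.length ≤ 1 then
      match ks with
      | [] => [1]
      | c :: _ => [c, 1]
    else
      let m := ks.length / 2
      convB (prodPolyF fuel (ks.take m)) (prodPolyF fuel (ks.drop m))

def prodPoly (ks : List Int) : List Int := prodPolyF ks.length ks

def solution_alt (n : Int) (count : Int) : Int :=
  if count > n ∨ count < 1 then 0
  else
    let ks := (PySem.List.pyRange 1 n 1).map (fun k => PySem.Int.mod (2 * k) pvMOD)
    (prodPoly ks).getD (count - 1).toNat 0

-- ===== PRECONDITION & SPEC =====
def Spec_solution (n : Int) (count : Int) (out : Int) : Prop := out = solution_alt n count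
instance (n : Int) (count : Int) (out : Int) : Decidable (Spec_solution n count out) := by unfold Spec_solution; infer_instance

-- ===== CLAIM (what is proved, stated in full; the proofs are below) =====
def Claim_equal_solution : Prop := ∀ (n : Int) (count : Int), Dom_solution n count → Spec_solution n count (solution n count)

-- ===== LEMMAS AND PROOFS =====

-- the canonical representative in [0, pvMOD) of a residue
def rep (z : ZMod 1000000007) : Int := (z.val : Int)

-- coefficient list ↦ polynomial over ZMod
noncomputable def PZ (a : List Int) : Polynomial (ZMod 1000000007) :=
  a.foldr (fun c q => Polynomial.C ((c : Int) : ZMod 1000000007) + Polynomial.X * q) 0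

-- constants list ↦ ∏ (X + C c)
noncomputable def FZ (cs : List Int) : Polynomial (ZMod 1000000007) :=
  (cs.map (fun c => Polynomial.X + Polynomial.C ((c : Int) : ZMod 1000000007))).prod

-- the factor list 2k mod p, k = 1..n-1 (identical to B's ks; A's (2i-2) % p is the same list)
def csL (n : Int) : List Int := (PySem.List.pyRange 1 n 1).map (fun k => PySem.Int.mod (2 * k) pvMOD)

-- the model of row i of A's table
noncomputable def modelRow (n : Int) (i : Nat) : List Int :=
  (List.range (n + 1).toNat).map (fun j =>
    if j = 0 then 0 else rep ((FZ ((csL n).take (i - 1))).coeff (j - 1)))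

-- the outer-loop invariant for A's table
noncomputable def InvA (n : Int) (t : Nat) (dp : List (List Int)) : Prop :=
  dp.length = (n + 1).toNat ∧ ∀ m : Nat, dp.getD m [] =
    if 1 ≤ m ∧ m ≤ t + 1 ∧ m < (n + 1).toNat then modelRow n m
    else if m < (n + 1).toNat then List.replicate (n + 1).toNat 0 else []

lemma rep_nonneg (z : ZMod 1000000007) : 0 ≤ rep z := by
  unfold rep; exact Int.natCast_nonneg _

lemma rep_lt (z : ZMod 1000000007) : rep z < pvMOD := by
  haveI : NeZero (1000000007 : ℕ) := ⟨by norm_num⟩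
  have := ZMod.val_lt z
  unfold rep pvMOD
  exact_mod_cast this

lemma cast_rep (z : ZMod 1000000007) : ((rep z : Int) : ZMod 1000000007) = z := by
  unfold rep
  simp [ZMod.intCast_cast]

lemma rep_unique {t : Int} {z : ZMod 1000000007} (h0 : 0 ≤ t) (h1 : t < pvMOD)
    (h : ((t : Int) : ZMod 1000000007) = z) : t = rep z := by
  have hc : ((t : Int) : ZMod 1000000007) = ((rep z : Int) : ZMod 1000000007) := by
    rw [h, cast_rep]
  rw [ZMod.intCast_eq_intCast_iff] at hc
  have hd : ((1000000007 : ℕ) : ℤ) ∣ rep z - t := hc.dvd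
  have hd' : (1000000007 : ℤ) ∣ rep z - t := by exact_mod_cast hd
  have h2 := rep_nonneg z
  have h3 := rep_lt z
  unfold pvMOD at *
  omega

lemma cast_emod (x : Int) : (((x % 1000000007 : Int)) : ZMod 1000000007) = (x : ZMod 1000000007) := by
  have h : (x % ((1000000007 : ℕ) : ℤ)) ≡ x [ZMOD (1000000007 : ℕ)] := by
    unfold Int.ModEq
    exact Int.emod_emod_of_dvd x dvd_rfl
  have h' : ((x % ((1000000007 : ℕ) : ℤ) : Int) : ZMod 1000000007) = (x : ZMod 1000000007) :=
    (ZMod.intCast_eq_intCast_iff _ _ _).2 h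
  exact_mod_cast h'

lemma mod_rep (x : Int) : PySem.Int.mod x pvMOD = rep ((x : Int) : ZMod 1000000007) := by
  have hpos : (0 : Int) < pvMOD := by unfold pvMOD; norm_num
  rw [PySem.Int.mod_eq_emod_of_pos hpos]
  apply rep_unique (Int.emod_nonneg x (by unfold pvMOD; norm_num)) (Int.emod_lt_of_pos x hpos)
  unfold pvMOD
  exact cast_emod x

lemma rep_zero : rep 0 = 0 := by
  haveI : NeZero (1000000007 : ℕ) := ⟨by norm_num⟩
  unfold rep; simp

lemma rep_one : rep 1 = 1 := by
  haveI : Fact (1 < (1000000007 : ℕ)) := ⟨by norm_num⟩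
  unfold rep; simp [ZMod.val_one]

-- ---- generic list helpers ----

lemma getD_set_self {α} (l : List α) (n : Nat) (h : n < l.length) (x : α) (d : α) :
    (l.set n x).getD n d = x := by
  rw [List.getD_eq_getElem _ _ (by simpa using h)]
  simp [List.getElem_set_self]

lemma getD_set_ne {α} (l : List α) {n m : Nat} (h : n ≠ m) (x : α) (d : α) :
    (l.set n x).getD m d = l.getD m d := by
  simp [List.getD_eq_getElem?_getD, List.getElem?_set_ne h]

lemma set_getD_self {α} (l : List α) (n : Nat) (h : n < l.length) (d : α) :
    l.set n (l.getD n d) = l := by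
  apply List.ext_getElem (by simp)
  intro i h1 h2
  by_cases hin : n = i
  · subst hin
    rw [List.getElem_set_self, List.getD_eq_getElem _ _ h]
  · rw [List.getElem_set_ne hin]

lemma ext_getD {α} {l₁ l₂ : List α} (d : α) (hlen : l₁.length = l₂.length)
    (h : ∀ p : Nat, l₁.getD p d = l₂.getD p d) : l₁ = l₂ := by
  apply List.ext_getElem hlen
  intro i h1 h2
  have := h i
  rwa [List.getD_eq_getElem _ _ h1, List.getD_eq_getElem _ _ h2] at this

lemma getD_replicate_zero (N p : Nat) : (List.replicate N (0 : Int)).getD p 0 = 0 := by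
  rcases lt_or_ge p N with h | h
  · rw [List.getD_eq_getElem _ _ (by simpa using h)]; simp
  · rw [List.getD_eq_default _ _ (by simpa using h)]

-- ---- polynomial side ----

lemma coeff_PZ (a : List Int) (k : Nat) :
    (PZ a).coeff k = ((a.getD k 0 : Int) : ZMod 1000000007) := by
  induction a generalizing k with
  | nil => simp [PZ]
  | cons c t ih =>
    cases k with
    | zero =>
      simp [PZ, Polynomial.coeff_add, Polynomial.mul_coeff_zero, Polynomial.coeff_X_zero]
    | succ k =>
      simp only [PZ, List.foldr_cons, Polynomial.coeff_add, Polynomial.coeff_C,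
        Polynomial.coeff_X_mul]
      rw [if_neg (by omega)]
      simpa [PZ] using ih k

lemma list_range_sum (m : Nat) (g : Nat → ZMod 1000000007) :
    ((List.range m).map g).sum = ∑ i ∈ Finset.range m, g i := by
  induction m with
  | zero => simp
  | succ m ih =>
    rw [List.range_succ, Finset.sum_range_succ, List.map_append, List.sum_append]
    simp [ih]

lemma FZ_nil : FZ [] = 1 := by simp [FZ]

lemma FZ_singleton (c : Int) :
    FZ [c] = Polynomial.X + Polynomial.C ((c : Int) : ZMod 1000000007) := by
  simp [FZ]

lemma FZ_append (l₁ l₂ : List Int) : FZ (l₁ ++ l₂) = FZ l₁ * FZ l₂ := by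
  simp [FZ]

lemma FZ_natDegree_le (cs : List Int) : (FZ cs).natDegree ≤ cs.length := by
  induction cs with
  | nil => simp [FZ_nil]
  | cons c t ih =>
    have h1 : FZ (c :: t) = FZ [c] * FZ t := by
      simpa using FZ_append [c] t
    rw [h1, FZ_singleton]
    calc ((Polynomial.X + Polynomial.C ((c : Int) : ZMod 1000000007)) * FZ t).natDegree
        ≤ (Polynomial.X + Polynomial.C ((c : Int) : ZMod 1000000007)).natDegree + (FZ t).natDegree :=
          Polynomial.natDegree_mul_le
      _ ≤ 1 + t.length := by
          gcongr
          calc (Polynomial.X + Polynomial.C ((c : Int) : ZMod 1000000007)).natDegree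
              ≤ max Polynomial.X.natDegree (Polynomial.C ((c : Int) : ZMod 1000000007)).natDegree :=
                Polynomial.natDegree_add_le _ _
            _ ≤ 1 := by simp [Polynomial.natDegree_X_le]
      _ = (c :: t).length := by simp [Nat.add_comm]

lemma range'_split : ∀ (m s n : Nat), List.range' s (m + n) = List.range' s m ++ List.range' (s + m) n := by
  intro m
  induction m with
  | zero => simp
  | succ m ih =>
    intro s n
    rw [show m + 1 + n = (m + n) + 1 from by omega, List.range'_succ, List.range'_succ, ih (s+1) n,
      show s + 1 + m = s + (m + 1) from by omega]
    simp

lemma cast_list_sum (l : List Int) :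
    ((l.sum : Int) : ZMod 1000000007) = (l.map (fun x : Int => (x : ZMod 1000000007))).sum := by
  induction l with
  | nil => simp
  | cons x t ih => simp [ih]

lemma conv_sum_eq (a b : List Int) (hla : 0 < a.length) (hlb : 0 < b.length) (k : Nat) :
    ((List.range' (k + 1 - b.length) (min k (a.length - 1) + 1 - (k + 1 - b.length))).map
      (fun i => a.getD i 0 * b.getD (k - i) 0)).sum
    = ((List.range (k + 1)).map (fun i => a.getD i 0 * b.getD (k - i) 0)).sum := by
  set lo := k + 1 - b.length with hlo
  set cnt := min k (a.length - 1) + 1 - lo with hcnt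
  have h2 : lo + cnt ≤ k + 1 := by omega
  rw [List.range_eq_range']
  rw [show k + 1 = lo + (cnt + (k + 1 - lo - cnt)) from by omega]
  rw [range'_split lo 0 (cnt + (k + 1 - lo - cnt))]
  simp only [Nat.zero_add]
  rw [range'_split cnt lo (k + 1 - lo - cnt)]
  rw [List.map_append, List.map_append, List.sum_append, List.sum_append]
  have z1 : ((List.range' 0 lo).map (fun i => a.getD i 0 * b.getD (k - i) 0)).sum = 0 := by
    apply List.sum_eq_zero
    intro x hx
    simp only [List.mem_map, List.mem_range'_1] at hx
    obtain ⟨i, hi, rfl⟩ := hx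
    rw [List.getD_eq_default b _ (by omega)]
    ring
  have z2 : ((List.range' (lo + cnt) (k + 1 - lo - cnt)).map
      (fun i => a.getD i 0 * b.getD (k - i) 0)).sum = 0 := by
    apply List.sum_eq_zero
    intro x hx
    simp only [List.mem_map, List.mem_range'_1] at hx
    obtain ⟨i, hi, rfl⟩ := hx
    rw [List.getD_eq_default a _ (by omega)]
    ring
  rw [z1, z2]
  ring

lemma convB_coeff (a b : List Int) (ha : a ≠ []) (hb : b ≠ []) (k : Nat) :
    (((List.range' (k + 1 - b.length) (min k (a.length - 1) + 1 - (k + 1 - b.length))).foldl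
      (fun s i => s + a.getD i 0 * b.getD (k - i) 0) 0 : Int) : ZMod 1000000007)
    = (PZ a * PZ b).coeff k := by
  have hla : 0 < a.length := List.length_pos_of_ne_nil ha
  have hlb : 0 < b.length := List.length_pos_of_ne_nil hb
  rw [PySem.List.foldl_add, zero_add, conv_sum_eq a b hla hlb k]
  rw [Polynomial.coeff_mul, Finset.Nat.sum_antidiagonal_eq_sum_range_succ_mk]
  rw [← list_range_sum]
  rw [show ((List.range (k + 1)).map (fun i => (PZ a).coeff i * (PZ b).coeff (k - i)))
      = (List.range (k + 1)).map
          (fun i => ((a.getD i 0 * b.getD (k - i) 0 : Int) : ZMod 1000000007)) from by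
    apply List.map_congr_left
    intro i _
    rw [coeff_PZ, coeff_PZ]
    push_cast
    ring]
  rw [cast_list_sum, List.map_map]
  rfl

lemma convB_eq (a b : List Int) (ha : a ≠ []) (hb : b ≠ []) :
    convB a b = (List.range (a.length + b.length - 1)).map
      (fun k => rep ((PZ a * PZ b).coeff k)) := by
  unfold convB
  rw [PySem.List.foldl_append_singleton_eq_map, List.nil_append]
  apply List.map_congr_left
  intro k _
  rw [mod_rep, convB_coeff a b ha hb k]

lemma coeff_PZmul_zero (a b : List Int) (ha : a ≠ []) (hb : b ≠ []) (k : Nat)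
    (hk : a.length + b.length - 1 ≤ k) : (PZ a * PZ b).coeff k = 0 := by
  have hla : 0 < a.length := List.length_pos_of_ne_nil ha
  have hlb : 0 < b.length := List.length_pos_of_ne_nil hb
  rw [Polynomial.coeff_mul]
  apply Finset.sum_eq_zero
  intro x hx
  rw [Finset.mem_antidiagonal] at hx
  by_cases h1 : x.1 < a.length
  · have : b.length ≤ x.2 := by omega
    rw [coeff_PZ, coeff_PZ, List.getD_eq_default b _ this]
    simp
  · rw [coeff_PZ, List.getD_eq_default a _ (by omega)]
    simp

lemma getD_convB (a b : List Int) (ha : a ≠ []) (hb : b ≠ []) (k : Nat) :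
    (convB a b).getD k 0 = rep ((PZ a * PZ b).coeff k) := by
  rw [convB_eq a b ha hb]
  rcases lt_or_ge k (a.length + b.length - 1) with h | h
  · rw [List.getD_eq_getElem _ _ (by simpa using h)]
    simp
  · rw [List.getD_eq_default _ _ (by simpa using h)]
    rw [coeff_PZmul_zero a b ha hb k h, rep_zero]

lemma length_convB (a b : List Int) (ha : a ≠ []) (hb : b ≠ []) :
    (convB a b).length = a.length + b.length - 1 := by
  rw [convB_eq a b ha hb]; simp

lemma prodPolyF_spec : ∀ (L : Nat) (ks : List Int), ks.length ≤ L →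
    (∀ c ∈ ks, 0 ≤ c ∧ c < pvMOD) →
    (prodPolyF L ks).length = ks.length + 1 ∧
      ∀ k : Nat, (prodPolyF L ks).getD k 0 = rep ((FZ ks).coeff k) := by
  intro L
  induction L with
  | zero =>
    intro ks hL _
    have : ks = [] := List.length_eq_zero_iff.mp (by omega)
    subst this
    rw [prodPolyF]
    refine ⟨by simp, fun k => ?_⟩
    rw [FZ_nil]
    cases k with
    | zero => simp [rep_one]
    | succ k =>
      rw [List.getD_eq_default _ _ (by simp)]
      simp [Polynomial.coeff_one, rep_zero]
  | succ L ih =>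
    intro ks hL hbound
    by_cases hlen : ks.length ≤ 1
    · simp only [prodPolyF]
      rw [if_pos hlen]
      match ks, hlen with
      | [], _ =>
        refine ⟨by simp, fun k => ?_⟩
        rw [FZ_nil]
        cases k with
        | zero => simp [rep_one]
        | succ k =>
          rw [List.getD_eq_default _ _ (by simp)]
          simp [Polynomial.coeff_one, rep_zero]
      | [c], _ =>
        refine ⟨by simp, fun k => ?_⟩
        rw [FZ_singleton]
        obtain ⟨hc0, hc1⟩ := hbound c (by simp)
        match k with
        | 0 =>
          rw [Polynomial.coeff_add, Polynomial.coeff_X_zero, Polynomial.coeff_C_zero, zero_add]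
          exact rep_unique hc0 hc1 rfl
        | 1 =>
          rw [Polynomial.coeff_add, Polynomial.coeff_X_one, Polynomial.coeff_C,
            if_neg one_ne_zero, add_zero, rep_one]
          rfl
        | (k+2) =>
          rw [List.getD_eq_default _ _ (by simp)]
          rw [Polynomial.coeff_add, Polynomial.coeff_X, Polynomial.coeff_C,
            if_neg (by omega : ¬ (1 : Nat) = k + 2), if_neg (by omega : ¬ k + 2 = 0), add_zero,
            rep_zero]
    · simp only [prodPolyF]
      rw [if_neg hlen]
      have hk2 : 2 ≤ ks.length := by omega
      set m := ks.length / 2 with hm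
      have hm1 : 1 ≤ m := by omega
      have hmlt : m < ks.length := by omega
      have htake : (ks.take m).length = m := by simp; omega
      have hdrop : (ks.drop m).length = ks.length - m := by simp
      have ih1 := ih (ks.take m) (by omega) (fun c hc => hbound c (List.take_subset _ _ hc))
      have ih2 := ih (ks.drop m) (by omega) (fun c hc => hbound c (List.drop_subset _ _ hc))
      have hne1 : prodPolyF L (ks.take m) ≠ [] := by
        intro h; have := ih1.1; rw [h] at this; simp at this
      have hne2 : prodPolyF L (ks.drop m) ≠ [] := by
        intro h; have := ih2.1; rw [h] at this; simp at this
      have hP1 : PZ (prodPolyF L (ks.take m)) = FZ (ks.take m) := by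
        apply Polynomial.ext
        intro k
        rw [coeff_PZ, ih1.2 k, cast_rep]
      have hP2 : PZ (prodPolyF L (ks.drop m)) = FZ (ks.drop m) := by
        apply Polynomial.ext
        intro k
        rw [coeff_PZ, ih2.2 k, cast_rep]
      constructor
      · rw [length_convB _ _ hne1 hne2, ih1.1, ih2.1]
        omega
      · intro k
        rw [getD_convB _ _ hne1 hne2, hP1, hP2, ← FZ_append, List.take_append_drop]

lemma prodPoly_spec (ks : List Int) (hb : ∀ c ∈ ks, 0 ≤ c ∧ c < pvMOD) :
    (prodPoly ks).length = ks.length + 1 ∧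
      ∀ k : Nat, (prodPoly ks).getD k 0 = rep ((FZ ks).coeff k) := by
  unfold prodPoly
  exact prodPolyF_spec ks.length ks le_rfl hb

-- ---- A side ----

lemma modelRow_length (n : Int) (i : Nat) : (modelRow n i).length = (n + 1).toNat := by
  simp [modelRow]

lemma modelRow_getD (n : Int) (i : Nat) (p : Nat) :
    (modelRow n i).getD p 0 =
      if p < (n + 1).toNat then
        (if p = 0 then 0 else rep ((FZ ((csL n).take (i - 1))).coeff (p - 1)))
      else 0 := by
  rcases lt_or_ge p (n + 1).toNat with h | h
  · rw [List.getD_eq_getElem _ _ (by simp [modelRow_length]; omega), if_pos h]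
    simp [modelRow]
  · rw [List.getD_eq_default _ _ (by simp [modelRow_length]; omega), if_neg (by omega)]

lemma inner_collapse (mul i : Int) (h2 : 2 ≤ i) (js : List Int) :
    ∀ (dp : List (List Int)), i.toNat < dp.length →
    js.foldl (solutionInner mul i) dp
      = dp.set i.toNat (js.foldl (fun row j =>
          row.set j.toNat (PySem.Int.mod ((dp.getD (i - 1).toNat []).getD (j - 1).toNat 0
            + mul * (dp.getD (i - 1).toNat []).getD j.toNat 0) pvMOD)) (dp.getD i.toNat [])) := by
  induction js with
  | nil =>
    intro dp hlen
    simp only [List.foldl_nil]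
    rw [set_getD_self _ _ hlen]
  | cons j js ih =>
    intro dp hlen
    have hne : i.toNat ≠ (i - 1).toNat := by omega
    simp only [List.foldl_cons]
    rw [show solutionInner mul i dp j
        = dp.set i.toNat ((dp.getD i.toNat []).set j.toNat
            (PySem.Int.mod ((dp.getD (i - 1).toNat []).getD (j - 1).toNat 0
              + mul * (dp.getD (i - 1).toNat []).getD j.toNat 0) pvMOD)) from rfl]
    rw [ih _ (by simpa using hlen)]
    rw [getD_set_ne _ hne, getD_set_self _ _ hlen, List.set_set]

lemma rowfold_length (g : Nat → Int) (N : Nat) (m : Nat) :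
    ((List.range m).foldl (fun row q => row.set (q + 1) (g q)) (List.replicate N (0 : Int))).length = N := by
  induction m with
  | zero => simp
  | succ m ih =>
    rw [List.range_succ, List.foldl_append]
    simp [ih]

lemma rowfold_getD (prev : List Int) (mul : Int) (N : Nat) (m : Nat) (hm : m + 1 ≤ N) :
    ∀ p : Nat,
      (((List.range m).foldl (fun row q => row.set (q + 1)
          (PySem.Int.mod (prev.getD q 0 + mul * prev.getD (q + 1) 0) pvMOD))
        (List.replicate N (0 : Int))).getD p 0)
      = if 1 ≤ p ∧ p ≤ m then
          PySem.Int.mod (prev.getD (p - 1) 0 + mul * prev.getD p 0) pvMOD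
        else 0 := by
  induction m with
  | zero =>
    intro p
    rw [if_neg (by omega)]
    rw [show List.range 0 = ([] : List Nat) from rfl, List.foldl_nil, getD_replicate_zero]
  | succ m ih =>
    intro p
    rw [List.range_succ, List.foldl_append]
    simp only [List.foldl_cons, List.foldl_nil]
    by_cases hp : p = m + 1
    · subst hp
      rw [getD_set_self _ _ (by rw [rowfold_length]; omega)]
      rw [if_pos (by omega)]
      simp
    · rw [getD_set_ne _ (by omega), ih (by omega) p]
      by_cases h1 : 1 ≤ p ∧ p ≤ m
      · rw [if_pos h1, if_pos (by omega)]
      · rw [if_neg h1, if_neg (show ¬(1 ≤ p ∧ p ≤ m + 1) from by omega)]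

lemma csL_length (n : Int) : (csL n).length = (n - 1).toNat := by
  simp [csL, PySem.List.length_pyRange_one]

lemma csL_getElem (n : Int) (t : Nat) (ht : t < (n - 1).toNat) :
    (csL n)[t]'(by rw [csL_length]; omega) = PySem.Int.mod (2 * (1 + (t : Int))) pvMOD := by
  simp [csL, PySem.List.getElem_pyRange_one]

lemma csL_take_succ (n : Int) (t : Nat) (ht : t < (n - 1).toNat) :
    (csL n).take (t + 1) = (csL n).take t ++ [PySem.Int.mod (2 * (1 + (t : Int))) pvMOD] := by
  rw [List.take_add_one]
  congr 1
  rw [List.getElem?_eq_getElem (by rw [csL_length]; omega), csL_getElem n t ht]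
  rfl

lemma step_value (n : Int) (t : Nat) (ht : (t : Int) ≤ n - 2) (hn : 1 ≤ n) (p : Nat)
    (hp1 : 1 ≤ p) (hp2 : p ≤ t + 2) :
    PySem.Int.mod ((modelRow n (t + 1)).getD (p - 1) 0
        + PySem.Int.mod (2 * (2 + (t : Int)) - 2) pvMOD * (modelRow n (t + 1)).getD p 0) pvMOD
      = rep ((FZ ((csL n).take (t + 1))).coeff (p - 1)) := by
  have hN : p < (n + 1).toNat := by omega
  have hN1 : p - 1 < (n + 1).toNat := by omega
  have htlt : t < (n - 1).toNat := by omega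
  rw [csL_take_succ n t htlt, FZ_append, FZ_singleton]
  rw [modelRow_getD, modelRow_getD, if_pos hN1, if_pos hN, if_neg (by omega : ¬ p = 0)]
  simp only [Nat.add_sub_cancel]
  rw [mod_rep]
  congr 1
  have hmul : ((PySem.Int.mod (2 * (2 + (t : Int)) - 2) pvMOD : Int) : ZMod 1000000007)
      = ((PySem.Int.mod (2 * (1 + (t : Int))) pvMOD : Int) : ZMod 1000000007) := by
    rw [mod_rep, cast_rep, mod_rep, cast_rep]
    push_cast
    ring
  set G := FZ ((csL n).take t) with hG
  set c : ZMod 1000000007 := ((PySem.Int.mod (2 * (1 + (t : Int))) pvMOD : Int) : ZMod 1000000007)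
    with hcd
  have hrhs : (G * (Polynomial.X + Polynomial.C c)).coeff (p - 1)
      = (if p - 1 = 0 then 0 else G.coeff (p - 1 - 1)) + G.coeff (p - 1) * c := by
    rw [mul_add, Polynomial.coeff_add, Polynomial.coeff_mul_C]
    congr 1
    cases hp : p - 1 with
    | zero => rw [Polynomial.mul_coeff_zero, Polynomial.coeff_X_zero, mul_zero, if_pos rfl]
    | succ q => rw [Polynomial.coeff_mul_X, if_neg (by omega), Nat.add_sub_cancel]
  rw [hrhs]
  by_cases hp : p = 1
  · subst hp
    simp only [Nat.sub_self]
    push_cast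
    rw [hmul, cast_rep]
    ring
  · rw [if_neg (by omega : ¬ p - 1 = 0), if_neg (by omega : ¬ p - 1 = 0)]
    push_cast
    rw [hmul, cast_rep, cast_rep]
    ring

lemma outer_step (n : Int) (hn : 1 ≤ n) (t : Nat) (ht : (t : Int) ≤ n - 2)
    (dp : List (List Int)) (hInv : InvA n t dp) :
    InvA n (t + 1) (solutionOuter dp (2 + (t : Int))) := by
  obtain ⟨hlen, hrows⟩ := hInv
  have hi2 : (2 : Int) ≤ 2 + (t : Int) := by omega
  have hiN : ((2 : Int) + (t : Int)).toNat = t + 2 := by omega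
  have hiN1 : ((2 : Int) + (t : Int) - 1).toNat = t + 1 := by omega
  have htN : t + 2 < (n + 1).toNat := by omega
  simp only [solutionOuter]
  rw [inner_collapse _ _ hi2 _ dp (by rw [hlen, hiN]; omega)]
  have hprev : dp.getD ((2 : Int) + (t : Int) - 1).toNat [] = modelRow n (t + 1) := by
    rw [hiN1, hrows, if_pos ⟨by omega, by omega, by omega⟩]
  have hcur : dp.getD ((2 : Int) + (t : Int)).toNat [] = List.replicate (n + 1).toNat 0 := by
    rw [hiN, hrows, if_neg (by omega), if_pos (by omega)]
  rw [hprev, hcur, hiN]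
  rw [show PySem.List.pyRange 1 (2 + (t : Int) + 1) 1
      = (List.range (t + 2)).map (fun (k : Nat) => (1 : Int) + (k : Int)) from by
    have hT : ((2 : Int) + (t : Int) + 1 - 1).toNat = t + 2 := by omega
    rw [PySem.List.pyRange_one, hT]]
  simp only [List.foldl_map]
  simp only [show ∀ q : Nat, ((1 : Int) + (q : Int)).toNat = q + 1 from fun q => by omega,
    show ∀ q : Nat, ((1 : Int) + (q : Int) - 1).toNat = q from fun q => by omega]
  constructor
  · rw [List.length_set, hlen]
  · intro m
    by_cases hm : m = t + 2
    · subst hm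
      rw [getD_set_self _ _ (by rw [hlen]; omega)]
      rw [if_pos ⟨by omega, by omega, by omega⟩]
      apply ext_getD 0
      · rw [rowfold_length, modelRow_length]
      · intro p
        rw [rowfold_getD _ _ _ (t + 2) (by omega) p, modelRow_getD n (t + 2) p]
        by_cases hp : 1 ≤ p ∧ p ≤ t + 2
        · rw [if_pos hp, if_pos (by omega), if_neg (by omega : ¬ p = 0)]
          exact step_value n t ht hn p hp.1 hp.2
        · rw [if_neg hp]
          by_cases hpN : p < (n + 1).toNat
          · rw [if_pos hpN]
            by_cases hp0 : p = 0
            · rw [if_pos hp0]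
            · rw [if_neg hp0]
              rw [Polynomial.coeff_eq_zero_of_natDegree_lt, rep_zero]
              calc (FZ ((csL n).take (t + 1))).natDegree
                  ≤ ((csL n).take (t + 1)).length := FZ_natDegree_le _
                _ ≤ t + 1 := by simp
                _ < p - 1 := by omega
          · rw [if_neg hpN]
    · rw [getD_set_ne _ (by omega : t + 2 ≠ m), hrows m]
      by_cases h1 : 1 ≤ m ∧ m ≤ t + 1 ∧ m < (n + 1).toNat
      · rw [if_pos h1, if_pos ⟨h1.1, by omega, h1.2.2⟩]
      · rw [if_neg h1,
          if_neg (show ¬(1 ≤ m ∧ m ≤ t + 1 + 1 ∧ m < (n + 1).toNat) from by omega)]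

lemma inv_init (n : Int) (hn : 1 ≤ n) :
    InvA n 0 ((List.replicate (n + 1).toNat (List.replicate (n + 1).toNat (0 : Int))).set 1
      (((List.replicate (n + 1).toNat (List.replicate (n + 1).toNat (0 : Int))).getD 1 []).set 1 1)) := by
  have hN2 : 2 ≤ (n + 1).toNat := by omega
  have hrow1 : (List.replicate (n + 1).toNat (List.replicate (n + 1).toNat (0 : Int))).getD 1 []
      = List.replicate (n + 1).toNat (0 : Int) := by
    rw [List.getD_eq_getElem _ _ (by simp; omega), List.getElem_replicate]
  constructor
  · simp
  · intro m
    by_cases hm : m = 1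
    · subst hm
      rw [getD_set_self _ _ (by simp; omega), hrow1]
      rw [if_pos ⟨le_refl 1, by omega, by omega⟩]
      apply ext_getD 0
      · rw [List.length_set, List.length_replicate, modelRow_length]
      · intro p
        rw [modelRow_getD]
        simp only [Nat.sub_self, List.take_zero, FZ_nil]
        by_cases hp : p = 1
        · subst hp
          rw [getD_set_self _ _ (by simp; omega)]
          rw [if_pos (by omega), if_neg one_ne_zero]
          simp [Polynomial.coeff_one, rep_one]
        · rw [getD_set_ne _ (by omega : (1 : Nat) ≠ p), getD_replicate_zero]
          by_cases hpN : p < (n + 1).toNat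
          · rw [if_pos hpN]
            by_cases hp0 : p = 0
            · rw [if_pos hp0]
            · rw [if_neg hp0]
              rw [Polynomial.coeff_one, if_neg (by omega : ¬ p - 1 = 0), rep_zero]
          · rw [if_neg hpN]
    · rw [getD_set_ne _ (by omega : (1 : Nat) ≠ m)]
      by_cases hmN : m < (n + 1).toNat
      · rw [List.getD_eq_getElem _ _ (by simp; omega), List.getElem_replicate]
        rw [if_neg (by omega), if_pos hmN]
      · rw [List.getD_eq_default _ _ (by simp; omega), if_neg (by omega), if_neg (by omega)]

lemma inv_final (n : Int) (hn : 1 ≤ n) :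
    ∀ t : Nat, t ≤ (n - 1).toNat →
    InvA n t ((List.range t).foldl (fun dp (q : Nat) => solutionOuter dp (2 + (q : Int)))
      ((List.replicate (n + 1).toNat (List.replicate (n + 1).toNat (0 : Int))).set 1
        (((List.replicate (n + 1).toNat (List.replicate (n + 1).toNat (0 : Int))).getD 1 []).set 1 1))) := by
  intro t
  induction t with
  | zero => intro _; simpa using inv_init n hn
  | succ t ih =>
    intro ht
    rw [List.range_succ, List.foldl_append]
    simp only [List.foldl_cons, List.foldl_nil]
    exact outer_step n hn t (by omega) _ (ih (by omega))

-- ===== VERDICT (by name: the statement is the Claim_ definition above) =====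
theorem solution_spec : Claim_equal_solution := by
  intro n count _
  show solution n count = solution_alt n count
  by_cases hg : count > n ∨ count < 1
  · simp only [solution, solution_alt, if_pos hg]
  · simp only [solution, solution_alt, if_neg hg]
    rw [not_or, not_lt, not_lt] at hg
    obtain ⟨hcn, hc1⟩ := hg
    have hn : 1 ≤ n := by omega
    have hks := prodPoly_spec (csL n) (by
      intro c hc
      simp only [csL, List.mem_map] at hc
      obtain ⟨k, _, rfl⟩ := hc
      exact ⟨PySem.Int.mod_nonneg _ (by unfold pvMOD; norm_num),
        PySem.Int.mod_lt _ (by unfold pvMOD; norm_num)⟩)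
    rw [show (PySem.List.pyRange 1 n 1).map (fun k => PySem.Int.mod (2 * k) pvMOD) = csL n from rfl]
    rw [hks.2 ((count - 1).toNat)]
    rw [show PySem.List.pyRange 2 (n + 1) 1
        = (List.range ((n - 1).toNat)).map (fun (k : Nat) => (2 : Int) + (k : Int)) from by
      have hT : ((n : Int) + 1 - 2).toNat = (n - 1).toNat := by omega
      rw [PySem.List.pyRange_one, hT]]
    simp only [List.foldl_map]
    obtain ⟨hflen, hfrows⟩ := inv_final n hn ((n - 1).toNat) le_rfl
    rw [hfrows n.toNat]
    rw [if_pos ⟨by omega, by omega, by omega⟩]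
    rw [modelRow_getD]
    rw [if_pos (by omega : count.toNat < (n + 1).toNat), if_neg (by omega : ¬ count.toNat = 0)]
    rw [show (csL n).take (n.toNat - 1) = csL n from by
      have h : n.toNat - 1 = (csL n).length := by rw [csL_length]; omega
      rw [h, List.take_length]]
    rw [show ((count : Int) - 1).toNat = count.toNat - 1 from by omega]
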